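-- pv_equiv track=rewrite | github.com/tsangwpx/leetcode | src/p2xxx/p2463.py | maxMoves
-- ===== SOURCE A (Python) =====
-- from typing import List
--
-- def maxMoves(grid: List[List[int]]) -> int:
--     m = len(grid)
--     n = len(grid[0])
--
--     # we may compress the space usage to O(N)
--     # by scanning the grid from left to right one column at a time
--     # so that the `pending` array is replaced by cell reachability in a column
--     # and the `dp` matrix can be optimized by reusing two columns
--
--     pending = [(0, i, 0) for i in range(m)]
--
--     max_moves = 0
--     dp = [[0] * n for _ in range(m)]
--
--     while pending:
--         count, i, j = pending.pop()
--
--         level = grid[i][j]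
--         count += 1
--         j += 1
--
--         if j >= n:
--             # moving out of last column
--             continue
--
--         found = False
--
--         if i >= 1 and level < grid[i - 1][j] and dp[i - 1][j] < count:
--             dp[i - 1][j] = count
--             pending.append((count, i - 1, j))
--             found = True
--
--         if level < grid[i][j] and dp[i][j] < count:
--             dp[i][j] = count
--             pending.append((count, i, j))
--             found = True
--
--         if i + 1 < m and level < grid[i + 1][j] and dp[i + 1][j] < count:
--             dp[i + 1][j] = count
--             pending.append((count, i + 1, j))
--             found = True
--
--         if found:
--             max_moves = max(max_moves, count)
--
--     return max_moves
-- ===== SOURCE B (Python) =====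
-- from typing import List
--
-- def maxMoves(grid: List[List[int]]) -> int:
--     # Column-by-column boolean DP: keep the set of rows reachable in the
--     # current column; the answer is the furthest column ever reached.
--     m = len(grid)
--     n = len(grid[0])
--     cur = [True] * m
--     moves = 0
--     for j in range(1, n):
--         nxt = [False] * m
--         alive = False
--         for i in range(m):
--             if cur[i]:
--                 for r in (i - 1, i, i + 1):
--                     if 0 <= r < m and grid[i][j - 1] < grid[r][j]:
--                         nxt[r] = True
--                         alive = True
--         if not alive:
--             return moves
--         cur = nxt
--         moves = j
--     return moves
-- ===== Notes on version B (the rewrite author's own statement) =====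
-- stated objective: simpler
-- what changed: A's stack-driven DFS with an m*n dp matrix of move counts is replaced by a left-to-right column sweep that keeps a single boolean array of reachable rows per column; the answer is the furthest column reached.
-- outside the precondition, e.g. on maxMoves([[2, -1, 0, 2], [2, -2, 2]]): A returns 0, B returns 0
import Mathlib
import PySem

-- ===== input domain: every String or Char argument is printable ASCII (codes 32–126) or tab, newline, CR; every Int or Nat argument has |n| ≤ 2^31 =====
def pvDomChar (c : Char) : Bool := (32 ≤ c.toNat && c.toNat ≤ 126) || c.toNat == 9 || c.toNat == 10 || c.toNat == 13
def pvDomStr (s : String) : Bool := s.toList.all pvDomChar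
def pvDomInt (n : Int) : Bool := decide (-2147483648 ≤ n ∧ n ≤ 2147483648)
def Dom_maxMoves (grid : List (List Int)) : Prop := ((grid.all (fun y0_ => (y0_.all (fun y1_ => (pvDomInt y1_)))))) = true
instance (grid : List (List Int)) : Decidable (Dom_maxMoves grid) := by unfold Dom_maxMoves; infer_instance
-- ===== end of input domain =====

-- B replaces A's stack-driven DFS over an m×n dp matrix by a left-to-right column
-- sweep keeping one boolean row-reachability array (simpler, O(m) extra space).

-- ===== PORT A =====
-- grid[a][b] (indices are in range whenever A's Python reads them, under Pre_)
def pvIdx2 (xss : List (List Int)) (a b : Int) : Int :=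
  PySem.List.pyGetD (PySem.List.pyGetD xss a []) b 0

-- dp[a][b] = v
def pvSet2 (xss : List (List Int)) (a b : Int) (v : Int) : List (List Int) :=
  PySem.List.pySetD xss a (PySem.List.pySetD (PySem.List.pyGetD xss a []) b v)

-- one `if … and level < grid[r][j] and dp[r][j] < count:` block of A's loop body
def pvStepCell (grid dp : List (List Int)) (level cnt r j : Int)
    (pend : List (Int × Int × Int)) : List (List Int) × List (Int × Int × Int) × Bool :=
  if level < pvIdx2 grid r j ∧ pvIdx2 dp r j < cnt then
    (pvSet2 dp r j cnt, (cnt, r, j) :: pend, true)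
  else (dp, pend, false)

-- A's `while pending:` loop; the stack top is the list head (Python pops/appends at
-- the end); fuel only makes the recursion total and is proved sufficient below.
def pvLoopA (grid : List (List Int)) (m n : Int) :
    Nat → List (Int × Int × Int) → Int → List (List Int) → Int
  | _, [], mx, _ => mx
  | 0, _, mx, _ => mx
  | fuel+1, (count0, i, j0) :: rest, mx, dp =>
    let level := pvIdx2 grid i j0
    let count := count0 + 1
    let j := j0 + 1
    if n ≤ j then pvLoopA grid m n fuel rest mx dp
    else
      let s1 := if 1 ≤ i then pvStepCell grid dp level count (i-1) j rest else (dp, rest, false)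
      let s2 := pvStepCell grid s1.1 level count i j s1.2.1
      let s3 := if i + 1 < m then pvStepCell grid s2.1 level count (i+1) j s2.2.1 else (s2.1, s2.2.1, false)
      let mx' := if s1.2.2 || s2.2.2 || s3.2.2 then max mx count else mx
      pvLoopA grid m n fuel s3.2.1 mx' s3.1

def maxMoves (grid : List (List Int)) : Int :=
  let m : Int := grid.length
  let n : Int := ((PySem.List.pyGetD grid 0 ([] : List Int)).length : Int)
  let pending := (PySem.List.pyRange 0 m 1).reverse.map (fun i => ((0:Int), i, (0:Int)))
  pvLoopA grid m n (grid.length * (PySem.List.pyGetD grid 0 ([] : List Int)).length + grid.length + 1)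
    pending 0 (List.replicate grid.length (List.replicate (PySem.List.pyGetD grid 0 ([] : List Int)).length (0:Int)))

-- ===== PORT B =====
-- one candidate r of B's `for r in (i-1, i, i+1):`
def pvTryMove (grid : List (List Int)) (m j i : Int) (st : List Bool × Bool) (r : Int) :
    List Bool × Bool :=
  if 0 ≤ r ∧ r < m ∧ pvIdx2 grid i (j-1) < pvIdx2 grid r j then
    (PySem.List.pySetD st.1 r true, true)
  else st

-- B's inner `for i in range(m):` building (nxt, alive) for column j
def pvColumn (grid : List (List Int)) (m j : Int) (cur : List Bool) : List Bool × Bool :=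
  (PySem.List.pyRange 0 m 1).foldl
    (fun st i => if PySem.List.pyGetD cur i false then [i-1, i, i+1].foldl (pvTryMove grid m j i) st else st)
    (List.replicate m.toNat false, false)

-- B's `for j in range(1, n):` with the early return when no row stays alive
def pvLoopB (grid : List (List Int)) (m : Int) :
    List Bool → Int → Int → Nat → Int
  | _, moves, _, 0 => moves
  | cur, moves, j, k+1 =>
    let (nxt, alive) := pvColumn grid m j cur
    if alive then pvLoopB grid m nxt j (j+1) k else moves

def maxMoves_alt (grid : List (List Int)) : Int :=
  let m : Int := grid.length
  let n : Int := ((PySem.List.pyGetD grid 0 ([] : List Int)).length : Int)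
  pvLoopB grid m (List.replicate grid.length true) 0 1 (n - 1).toNat

-- ===== PRECONDITION & SPEC =====
-- Pre_ excludes the empty grid and grids whose first row is empty or longer than some
-- other row: there Python A raises IndexError — except on some ragged grids whose short
-- rows are never reached, where A happens to return (see claim cites); those are excluded too.
def Pre_maxMoves (grid : List (List Int)) : Prop :=
  grid ≠ [] ∧ 1 ≤ (grid.headD []).length ∧ ∀ row ∈ grid, (grid.headD []).length ≤ row.length
instance (grid : List (List Int)) : Decidable (Pre_maxMoves grid) := by
  unfold Pre_maxMoves; infer_instance

def pvWitness_maxMoves : List (List Int) := [[1, 2], [3, 4]]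

def Spec_maxMoves (grid : List (List Int)) (out : Int) : Prop := out = maxMoves_alt grid
instance (grid : List (List Int)) (out : Int) : Decidable (Spec_maxMoves grid out) := by
  unfold Spec_maxMoves; infer_instance

-- ===== CLAIM (what is proved, stated in full; the proofs are below) =====
def Claim_equal_maxMoves : Prop :=
  ∀ (grid : List (List Int)), Dom_maxMoves grid → Pre_maxMoves grid →
    Spec_maxMoves grid (maxMoves grid)

-- ===== LEMMAS AND PROOFS =====

def pvM (grid : List (List Int)) : Nat := grid.length
def pvN (grid : List (List Int)) : Nat := (grid.headD []).length
def pvVal (xss : List (List Int)) (i j : Nat) : Int := (xss.getD i []).getD j 0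
def pvVis (dp : List (List Int)) (i j : Nat) : Prop := pvVal dp i j ≠ 0
def pvAdj (i r : Nat) : Prop := i = r + 1 ∨ r = i ∨ r = i + 1

-- cell (i,j) of the grid is reachable by a strictly increasing path from column 0
def pvReach (grid : List (List Int)) : Nat → Nat → Bool
  | 0 => fun i => decide (i < pvM grid)
  | j+1 => fun r => decide (r < pvM grid) &&
      (List.range (pvM grid)).any
        (fun i => pvReach grid j i && decide ((i = r + 1 ∨ r = i ∨ r = i + 1) ∧ pvVal grid i j < pvVal grid r (j+1)))

-- x is the index of the furthest reachable column (0 if none beyond column 0)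
def pvIsAns (grid : List (List Int)) (x : Int) : Prop :=
  0 ≤ x ∧
  (x = 0 ∨ ∃ j : Nat, x = (j:Int) ∧ 1 ≤ j ∧ j < pvN grid ∧ ∃ i, pvReach grid j i = true) ∧
  ∀ j : Nat, 1 ≤ j → j < pvN grid → (∃ i, pvReach grid j i = true) → (j:Int) ≤ x

def pvRowU (row : List Int) : Nat := (row.map (fun v => if v = 0 then 1 else 0)).sum
def pvU (dp : List (List Int)) : Nat := (dp.map pvRowU).sum

def pvShape (grid dp : List (List Int)) : Prop :=
  dp.length = pvM grid ∧ ∀ row ∈ dp, row.length = pvN grid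

structure pvInvA (grid : List (List Int)) (pending : List (Int × Int × Int))
    (mx : Int) (dp : List (List Int)) : Prop where
  shape : pvShape grid dp
  dpVal : ∀ a b, pvVal dp a b = 0 ∨ (pvVal dp a b = (b:Int) ∧ 1 ≤ b)
  visSound : ∀ a b, pvVis dp a b → a < pvM grid ∧ b < pvN grid ∧ 1 ≤ b ∧ pvReach grid b a = true
  pend : ∀ t ∈ pending, ∃ i j : Nat,
      t = ((j:Int), (i:Int), (j:Int)) ∧ i < pvM grid ∧ j < pvN grid ∧ pvReach grid j i = true
  closure : ∀ i j, i < pvM grid → j < pvN grid → (j = 0 ∨ pvVis dp i j) →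
      (((j:Int), (i:Int), (j:Int)) ∈ pending ∨
        ∀ r, r < pvM grid → pvAdj i r → j+1 < pvN grid →
          pvVal grid i j < pvVal grid r (j+1) → pvVis dp r (j+1))
  mxlow : 0 ≤ mx
  mxwit : mx = 0 ∨ ∃ a b, pvVis dp a b ∧ mx = (b:Int)
  mxub : ∀ a b, pvVis dp a b → (b:Int) ≤ mx

lemma pvIsAns_unique (grid : List (List Int)) (x y : Int)
    (hx : pvIsAns grid x) (hy : pvIsAns grid y) : x = y := by
  obtain ⟨hx0, hxw, hxub⟩ := hx
  obtain ⟨hy0, hyw, hyub⟩ := hy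
  rcases hxw with hx1 | ⟨j, hxj, hj1, hjN, hjr⟩ <;>
    rcases hyw with hy1 | ⟨k, hyk, hk1, hkN, hkr⟩
  · omega
  · have := hxub k hk1 hkN hkr; omega
  · have := hyub j hj1 hjN hjr; omega
  · have h1 := hxub k hk1 hkN hkr
    have h2 := hyub j hj1 hjN hjr
    omega

lemma pvReach_lt (grid : List (List Int)) (j i : Nat) (h : pvReach grid j i = true) :
    i < pvM grid := by
  cases j with
  | zero => simpa [pvReach] using h
  | succ j => simp [pvReach] at h; exact h.1

lemma pvReach_succ_intro (grid : List (List Int)) (j i r : Nat)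
    (hr : r < pvM grid) (hi : pvReach grid j i = true) (hadj : pvAdj i r)
    (hlt : pvVal grid i j < pvVal grid r (j+1)) : pvReach grid (j+1) r = true := by
  have hiM : i < pvM grid := pvReach_lt grid j i hi
  simp only [pvReach, Bool.and_eq_true, decide_eq_true_eq, List.any_eq_true]
  exact ⟨hr, i, List.mem_range.2 hiM, by simp [hi, hlt]; exact hadj⟩

lemma pvReach_succ_elim (grid : List (List Int)) (j r : Nat)
    (h : pvReach grid (j+1) r = true) :
    r < pvM grid ∧ ∃ i, pvReach grid j i = true ∧ pvAdj i r ∧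
      pvVal grid i j < pvVal grid r (j+1) := by
  simp only [pvReach, Bool.and_eq_true, decide_eq_true_eq, List.any_eq_true] at h
  obtain ⟨hr, i, _, hi, hadj, hlt⟩ := h
  exact ⟨hr, i, hi, hadj, hlt⟩

lemma pvReach_anti (grid : List (List Int)) (j : Nat)
    (h : ∃ i, pvReach grid (j+1) i = true) : ∃ i, pvReach grid j i = true := by
  obtain ⟨r, hr⟩ := h
  obtain ⟨-, i, hi, -, -⟩ := pvReach_succ_elim grid j r hr
  exact ⟨i, hi⟩

-- reachable columns are downward closed (nonemptiness)
lemma pvReach_le (grid : List (List Int)) (j k : Nat) (hk : k ≤ j)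
    (h : ∃ i, pvReach grid j i = true) : ∃ i, pvReach grid k i = true := by
  induction j with
  | zero => simpa [Nat.le_zero.1 hk] using h
  | succ j ih =>
    rcases Nat.lt_or_ge k (j+1) with hlt | hge
    · exact ih (by omega) (pvReach_anti grid j h)
    · have : k = j + 1 := by omega
      simpa [this] using h

-- ===== indexing / update toolbox =====
lemma pvIdx2_cast (xss : List (List Int)) (a b : Nat) :
    pvIdx2 xss (a : Int) (b : Int) = pvVal xss a b := by
  simp [pvIdx2, pvVal, PySem.List.pyGetD_natCast]

lemma pvGetD_set {α : Type} :
    ∀ (xs : List α) (n k : Nat) (x d : α), n < xs.length →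
      ((xs.set n x).getD k d = if k = n then x else xs.getD k d)
  | [], n, k, x, d, h => by simp at h
  | y :: ys, 0, 0, x, d, h => by simp
  | y :: ys, 0, k+1, x, d, h => by simp
  | y :: ys, n+1, 0, x, d, h => by simp
  | y :: ys, n+1, k+1, x, d, h => by
      have := pvGetD_set ys n k x d (by simpa using h)
      simpa [Nat.succ_inj] using this

lemma pvSet2_cast (dp : List (List Int)) (r c : Nat) (v : Int)
    (hr : r < dp.length) (hc : c < (dp.getD r []).length) :
    pvSet2 dp (r : Int) (c : Int) v = dp.set r ((dp.getD r []).set c v) := by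
  unfold pvSet2
  rw [PySem.List.pyGetD_natCast]
  unfold PySem.List.pySetD
  rw [PySem.List.pySet?_natCast _ _ _ hc, Option.getD_some,
    PySem.List.pySet?_natCast _ _ _ hr, Option.getD_some]

lemma pvVal_set2 (dp : List (List Int)) (r c : Nat) (v : Int)
    (hr : r < dp.length) (hc : c < (dp.getD r []).length) (a b : Nat) :
    pvVal (dp.set r ((dp.getD r []).set c v)) a b =
      if a = r ∧ b = c then v else pvVal dp a b := by
  unfold pvVal
  rw [pvGetD_set dp r a _ [] hr]
  by_cases ha : a = r
  · subst ha
    rw [if_pos rfl, pvGetD_set _ c b v 0 hc]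
    by_cases hb : b = c
    · simp [hb]
    · simp [hb]
  · simp [ha]

lemma pvShape_set2 (grid dp : List (List Int)) (r c : Nat) (v : Int)
    (hr : r < dp.length) (h : pvShape grid dp) :
    pvShape grid (dp.set r ((dp.getD r []).set c v)) := by
  obtain ⟨h1, h2⟩ := h
  refine ⟨by simpa using h1, ?_⟩
  intro row hrow
  rcases List.mem_or_eq_of_mem_set hrow with hmem | heq
  · exact h2 row hmem
  · subst heq
    have hmem : dp.getD r [] ∈ dp := by
      rw [List.getD_eq_getElem?_getD, List.getElem?_eq_getElem hr]
      exact List.getElem_mem hr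
    simpa using h2 _ hmem

lemma pvSum_map_set {α : Type} (f : α → Nat) (d : α) :
    ∀ (xs : List α) (n : Nat) (x : α), n < xs.length →
      ((xs.set n x).map f).sum + f (xs.getD n d) = (xs.map f).sum + f x
  | [], n, x, h => by simp at h
  | y :: ys, 0, x, h => by simp; omega
  | y :: ys, n+1, x, h => by
      have := pvSum_map_set f d ys n x (by simpa using h)
      simp only [List.set_cons_succ, List.map_cons, List.sum_cons, List.getD_cons_succ]
      omega

lemma pvU_set2 (dp : List (List Int)) (r c : Nat) (v : Int)
    (hr : r < dp.length) (hc : c < (dp.getD r []).length)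
    (hold : pvVal dp r c = 0) (hv : v ≠ 0) :
    pvU (dp.set r ((dp.getD r []).set c v)) + 1 = pvU dp := by
  have h1 := pvSum_map_set pvRowU ([] : List Int) dp r ((dp.getD r []).set c v) hr
  have h2 := pvSum_map_set (fun w => if w = 0 then 1 else 0) (0 : Int) (dp.getD r []) c v hc
  rw [pvVal] at hold
  rw [hold] at h2
  have hrow : pvRowU ((dp.getD r []).set c v) + 1 = pvRowU (dp.getD r []) := by
    unfold pvRowU
    simpa [hv] using h2
  unfold pvU
  omega

lemma pvStepCell_spec (grid dp : List (List Int)) (pend : List (Int × Int × Int))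
    (i j0 r : Nat)
    (hshape : pvShape grid dp)
    (hdpVal : ∀ a b, pvVal dp a b = 0 ∨ (pvVal dp a b = (b:Int) ∧ 1 ≤ b))
    (hr : r < pvM grid) (hj : j0 + 1 < pvN grid)
    (hreach : pvVal grid i j0 < pvVal grid r (j0+1) → pvReach grid (j0+1) r = true) :
    pvShape grid (pvStepCell grid dp (pvVal grid i j0) ((j0:Int)+1) (r:Int) ((j0:Int)+1) pend).1 ∧
    (∀ a b, pvVal (pvStepCell grid dp (pvVal grid i j0) ((j0:Int)+1) (r:Int) ((j0:Int)+1) pend).1 a b = 0 ∨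
      (pvVal (pvStepCell grid dp (pvVal grid i j0) ((j0:Int)+1) (r:Int) ((j0:Int)+1) pend).1 a b = (b:Int) ∧ 1 ≤ b)) ∧
    (∀ a b, pvVis dp a b → pvVis (pvStepCell grid dp (pvVal grid i j0) ((j0:Int)+1) (r:Int) ((j0:Int)+1) pend).1 a b) ∧
    (∀ a b, pvVis (pvStepCell grid dp (pvVal grid i j0) ((j0:Int)+1) (r:Int) ((j0:Int)+1) pend).1 a b →
      pvVis dp a b ∨ (a = r ∧ b = j0+1 ∧ pvReach grid (j0+1) r = true ∧
        (((j0:Int)+1), (r:Int), ((j0:Int)+1)) ∈ (pvStepCell grid dp (pvVal grid i j0) ((j0:Int)+1) (r:Int) ((j0:Int)+1) pend).2.1)) ∧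
    (pvVal grid i j0 < pvVal grid r (j0+1) → pvVis (pvStepCell grid dp (pvVal grid i j0) ((j0:Int)+1) (r:Int) ((j0:Int)+1) pend).1 r (j0+1)) ∧
    (∀ t ∈ (pvStepCell grid dp (pvVal grid i j0) ((j0:Int)+1) (r:Int) ((j0:Int)+1) pend).2.1,
      t ∈ pend ∨ (t = (((j0:Int)+1), (r:Int), ((j0:Int)+1)) ∧ pvReach grid (j0+1) r = true)) ∧
    (∀ t ∈ pend, t ∈ (pvStepCell grid dp (pvVal grid i j0) ((j0:Int)+1) (r:Int) ((j0:Int)+1) pend).2.1) ∧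
    ((pvStepCell grid dp (pvVal grid i j0) ((j0:Int)+1) (r:Int) ((j0:Int)+1) pend).2.2 = true →
      pvVis (pvStepCell grid dp (pvVal grid i j0) ((j0:Int)+1) (r:Int) ((j0:Int)+1) pend).1 r (j0+1)) ∧
    ((pvStepCell grid dp (pvVal grid i j0) ((j0:Int)+1) (r:Int) ((j0:Int)+1) pend).2.1.length +
      pvU (pvStepCell grid dp (pvVal grid i j0) ((j0:Int)+1) (r:Int) ((j0:Int)+1) pend).1 = pend.length + pvU dp) ∧
    ((pvStepCell grid dp (pvVal grid i j0) ((j0:Int)+1) (r:Int) ((j0:Int)+1) pend).2.2 = false →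
      (pvStepCell grid dp (pvVal grid i j0) ((j0:Int)+1) (r:Int) ((j0:Int)+1) pend).1 = dp ∧
      (pvStepCell grid dp (pvVal grid i j0) ((j0:Int)+1) (r:Int) ((j0:Int)+1) pend).2.1 = pend) := by
  have hcast : ((j0:Int)+1) = (((j0+1 : Nat)) : Int) := by push_cast; ring
  have hval0 : pvVal dp r (j0+1) = 0 ∨ (pvVal dp r (j0+1) = ((j0+1 : Nat):Int) ∧ 1 ≤ j0+1) :=
    hdpVal r (j0+1)
  unfold pvStepCell
  rw [hcast, pvIdx2_cast, pvIdx2_cast]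
  by_cases hG : pvVal grid i j0 < pvVal grid r (j0+1) ∧ pvVal dp r (j0+1) < (((j0+1:Nat)):Int)
  · rw [if_pos hG]
    obtain ⟨hlt, hdplt⟩ := hG
    have hold : pvVal dp r (j0+1) = 0 := by
      rcases hval0 with h | ⟨h, _⟩
      · exact h
      · rw [h] at hdplt; omega
    have hrdp : r < dp.length := by rw [hshape.1]; exact hr
    have hcdp : j0 + 1 < (dp.getD r []).length := by
      have hmem : dp.getD r [] ∈ dp := by
        rw [List.getD_eq_getElem?_getD, List.getElem?_eq_getElem hrdp]
        exact List.getElem_mem hrdp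
      rw [hshape.2 _ hmem]; exact hj
    rw [pvSet2_cast dp r (j0+1) _ hrdp hcdp]
    have hval := pvVal_set2 dp r (j0+1) (((j0+1:Nat)):Int) hrdp hcdp
    have hvisNew : pvVis (dp.set r ((dp.getD r []).set (j0+1) (((j0+1:Nat)):Int))) r (j0+1) := by
      unfold pvVis; rw [hval r (j0+1), if_pos ⟨rfl, rfl⟩]
      simp; omega
    refine ⟨pvShape_set2 grid dp r (j0+1) _ hrdp hshape, ?_, ?_, ?_, ?_, ?_, ?_, ?_, ?_, ?_⟩
    · intro a b
      rw [hval a b]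
      by_cases hab : a = r ∧ b = j0+1
      · rw [if_pos hab]; right; rw [hab.2]; exact ⟨rfl, by omega⟩
      · rw [if_neg hab]; exact hdpVal a b
    · intro a b hv
      unfold pvVis at hv ⊢
      rw [hval a b]
      by_cases hab : a = r ∧ b = j0+1
      · rw [if_pos hab]; simp; omega
      · rwa [if_neg hab]
    · intro a b hv
      unfold pvVis at hv
      rw [hval a b] at hv
      by_cases hab : a = r ∧ b = j0+1
      · right; exact ⟨hab.1, hab.2, hreach hlt, by simp⟩
      · rw [if_neg hab] at hv; left; exact hv
    · intro _; exact hvisNew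
    · intro t ht
      rcases List.mem_cons.1 ht with h | h
      · right; exact ⟨h, hreach hlt⟩
      · left; exact h
    · intro t ht; exact List.mem_cons_of_mem _ ht
    · intro _; exact hvisNew
    · have := pvU_set2 dp r (j0+1) (((j0+1:Nat)):Int) hrdp hcdp hold (by omega)
      simp only [List.length_cons]
      omega
    · intro h; simp at h
  · rw [if_neg hG]
    refine ⟨hshape, hdpVal, fun a b h => h, fun a b h => Or.inl h, ?_, ?_, ?_, ?_, ?_, ?_⟩
    · intro hlt
      have hnd : ¬ pvVal dp r (j0+1) < (((j0+1:Nat)):Int) := fun hd => hG ⟨hlt, hd⟩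
      unfold pvVis
      rcases hval0 with h | ⟨h, _⟩
      · exfalso; apply hnd; rw [h]; omega
      · rw [h]; omega
    · intro t ht; left; exact ht
    · intro t ht; exact ht
    · intro h; simp at h
    · rfl
    · intro _; exact ⟨rfl, rfl⟩

-- facts about one (possibly skipped) push-branch of A's loop body, popped cell in column j0
structure pvSF (grid dp : List (List Int)) (pend : List (Int × Int × Int)) (j0 : Nat)
    (dp' : List (List Int)) (p' : List (Int × Int × Int)) : Prop where
  shape : pvShape grid dp'
  dpVal : ∀ a b, pvVal dp' a b = 0 ∨ (pvVal dp' a b = (b:Int) ∧ 1 ≤ b)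
  mono : ∀ a b, pvVis dp a b → pvVis dp' a b
  new : ∀ a b, pvVis dp' a b → pvVis dp a b ∨
      (b = j0+1 ∧ a < pvM grid ∧ pvReach grid (j0+1) a = true ∧
        (((j0+1:Nat):Int), ((a:Nat):Int), ((j0+1:Nat):Int)) ∈ p')
  pendSub : ∀ t ∈ p', t ∈ pend ∨ ∃ a : Nat, a < pvM grid ∧ pvReach grid (j0+1) a = true ∧
      t = (((j0+1:Nat):Int), ((a:Nat):Int), ((j0+1:Nat):Int))
  pendSup : ∀ t ∈ pend, t ∈ p'
  pot : p'.length + pvU dp' = pend.length + pvU dp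

lemma pvSF_id (grid dp : List (List Int)) (pend : List (Int × Int × Int)) (j0 : Nat)
    (hshape : pvShape grid dp)
    (hdpVal : ∀ a b, pvVal dp a b = 0 ∨ (pvVal dp a b = (b:Int) ∧ 1 ≤ b)) :
    pvSF grid dp pend j0 dp pend :=
  ⟨hshape, hdpVal, fun _ _ h => h, fun _ _ h => Or.inl h, fun _ ht => Or.inl ht,
    fun _ ht => ht, rfl⟩

lemma pvSF_comp (grid dp dp1 dp2 : List (List Int))
    (pend p1 p2 : List (Int × Int × Int)) (j0 : Nat)
    (h1 : pvSF grid dp pend j0 dp1 p1) (h2 : pvSF grid dp1 p1 j0 dp2 p2) :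
    pvSF grid dp pend j0 dp2 p2 := by
  refine ⟨h2.shape, h2.dpVal, fun a b h => h2.mono a b (h1.mono a b h), ?_, ?_,
    fun t ht => h2.pendSup t (h1.pendSup t ht), by have := h1.pot; have := h2.pot; omega⟩
  · intro a b h
    rcases h2.new a b h with h' | h'
    · rcases h1.new a b h' with h'' | ⟨hb, ha, hre, hmem⟩
      · exact Or.inl h''
      · exact Or.inr ⟨hb, ha, hre, h2.pendSup _ hmem⟩
    · exact Or.inr h'
  · intro t ht
    rcases h2.pendSub t ht with h' | h'
    · exact h1.pendSub t h'
    · exact Or.inr h'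

-- a fired/skipped branch, as pvSF plus the branch-specific facts
lemma pvStepCell_pvSF (grid dp : List (List Int)) (pend : List (Int × Int × Int))
    (i j0 r : Nat)
    (hshape : pvShape grid dp)
    (hdpVal : ∀ a b, pvVal dp a b = 0 ∨ (pvVal dp a b = (b:Int) ∧ 1 ≤ b))
    (hr : r < pvM grid) (hj : j0 + 1 < pvN grid)
    (hreach : pvVal grid i j0 < pvVal grid r (j0+1) → pvReach grid (j0+1) r = true) :
    pvSF grid dp pend j0
      (pvStepCell grid dp (pvVal grid i j0) ((j0:Int)+1) (r:Int) ((j0:Int)+1) pend).1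
      (pvStepCell grid dp (pvVal grid i j0) ((j0:Int)+1) (r:Int) ((j0:Int)+1) pend).2.1 ∧
    (pvVal grid i j0 < pvVal grid r (j0+1) →
      pvVis (pvStepCell grid dp (pvVal grid i j0) ((j0:Int)+1) (r:Int) ((j0:Int)+1) pend).1 r (j0+1)) ∧
    ((pvStepCell grid dp (pvVal grid i j0) ((j0:Int)+1) (r:Int) ((j0:Int)+1) pend).2.2 = true →
      pvVis (pvStepCell grid dp (pvVal grid i j0) ((j0:Int)+1) (r:Int) ((j0:Int)+1) pend).1 r (j0+1)) ∧
    ((pvStepCell grid dp (pvVal grid i j0) ((j0:Int)+1) (r:Int) ((j0:Int)+1) pend).2.2 = false →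
      (pvStepCell grid dp (pvVal grid i j0) ((j0:Int)+1) (r:Int) ((j0:Int)+1) pend).1 = dp ∧
      (pvStepCell grid dp (pvVal grid i j0) ((j0:Int)+1) (r:Int) ((j0:Int)+1) pend).2.1 = pend) := by
  obtain ⟨hSh, hDv, hMono, hNew, hDone, hPsub, hPsup, hFvis, hPot, hFf⟩ :=
    pvStepCell_spec grid dp pend i j0 r hshape hdpVal hr hj hreach
  have hcast : ((j0:Int)+1) = (((j0+1 : Nat)) : Int) := by push_cast; ring
  refine ⟨⟨hSh, hDv, hMono, ?_, ?_, hPsup, hPot⟩, hDone, hFvis, hFf⟩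
  · intro a b h
    rcases hNew a b h with h' | ⟨ha, hb, hre, hmem⟩
    · exact Or.inl h'
    · subst ha; subst hb
      exact Or.inr ⟨rfl, hr, hre, by rwa [← hcast]⟩
  · intro t ht
    rcases hPsub t ht with h' | ⟨h1', h2'⟩
    · exact Or.inl h'
    · exact Or.inr ⟨r, hr, h2', by rwa [hcast] at h1'⟩

lemma pvLoopA_post (grid : List (List Int)) :
    ∀ (fuel : Nat) (pending : List (Int × Int × Int)) (mx : Int) (dp : List (List Int)),
      pvInvA grid pending mx dp → pending.length + pvU dp ≤ fuel →
      ∃ dpF, pvInvA grid [] (pvLoopA grid ((pvM grid : Nat) : Int) ((pvN grid : Nat) : Int) fuel pending mx dp) dpF := by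
  intro fuel
  induction fuel with
  | zero =>
    intro pending mx dp hInv hF
    cases pending with
    | nil => exact ⟨dp, hInv⟩
    | cons t rest => simp only [List.length_cons] at hF; omega
  | succ fuel ih =>
    intro pending mx dp hInv hF
    cases pending with
    | nil => exact ⟨dp, hInv⟩
    | cons t rest =>
      obtain ⟨i, j0, ht, hiM, hj0N, hre0⟩ := hInv.pend t List.mem_cons_self
      subst ht
      rw [pvLoopA]
      simp only [pvIdx2_cast]
      by_cases hjN : ((pvN grid : Nat) : Int) ≤ (j0 : Int) + 1
      · rw [if_pos hjN]
        have hj1 : j0 + 1 = pvN grid := by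
          have : (pvN grid : Int) ≤ (j0 : Int) + 1 := hjN
          omega
        refine ih rest mx dp ⟨hInv.shape, hInv.dpVal, hInv.visSound, ?_, ?_,
          hInv.mxlow, hInv.mxwit, hInv.mxub⟩ ?_
        · intro t ht; exact hInv.pend t (List.mem_cons_of_mem _ ht)
        · intro a b haM hbN hact
          rcases hInv.closure a b haM hbN hact with hmem | hcl
          · rcases List.mem_cons.1 hmem with heq | hmem'
            · right
              intro r hrM hadj hbb hlt
              exfalso
              have hb : b = j0 := by
                have := congrArg Prod.fst heq
                simpa using this
              omega
            · left; exact hmem'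
          · right; exact hcl
        · simp only [List.length_cons] at hF; omega
      · rw [if_neg hjN]
        have hj1 : j0 + 1 < pvN grid := by
          have : ¬ ((pvN grid : Int) ≤ (j0 : Int) + 1) := hjN
          omega
        set s1 := (if (1:Int) ≤ (i:Int) then
            pvStepCell grid dp (pvVal grid i j0) ((j0:Int) + 1) ((i:Int) - 1) ((j0:Int) + 1) rest
          else (dp, rest, false)) with hs1
        set s2 := pvStepCell grid s1.1 (pvVal grid i j0) ((j0:Int) + 1) (i:Int) ((j0:Int) + 1) s1.2.1 with hs2
        set s3 := (if (i:Int) + 1 < ((pvM grid : Nat) : Int) then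
            pvStepCell grid s2.1 (pvVal grid i j0) ((j0:Int) + 1) ((i:Int) + 1) ((j0:Int) + 1) s2.2.1
          else (s2.1, s2.2.1, false)) with hs3
        -- facts about branch 1
        have H1 : pvSF grid dp rest j0 s1.1 s1.2.1 ∧
            (∀ hii : 1 ≤ i, pvVal grid i j0 < pvVal grid (i-1) (j0+1) → pvVis s1.1 (i-1) (j0+1)) ∧
            (s1.2.2 = true → ∃ a, pvVis s1.1 a (j0+1)) ∧
            (s1.2.2 = false → s1.1 = dp ∧ s1.2.1 = rest) := by
          rw [hs1]
          by_cases hi1 : (1:Int) ≤ (i:Int)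
          · rw [if_pos hi1]
            have hii : (i:Int) - 1 = ((i-1 : Nat) : Int) := by omega
            rw [hii]
            obtain ⟨hSF, hDone, hFvis, hFf⟩ := pvStepCell_pvSF grid dp rest i j0 (i-1)
              hInv.shape hInv.dpVal (by omega) hj1
              (fun hlt => pvReach_succ_intro grid j0 i (i-1) (by omega) hre0
                (Or.inl (by omega)) hlt)
            exact ⟨hSF, fun _ h => hDone h, fun hf => ⟨i-1, hFvis hf⟩, hFf⟩
          · rw [if_neg hi1]
            refine ⟨pvSF_id grid dp rest j0 hInv.shape hInv.dpVal, ?_, by simp, fun _ => ⟨rfl, rfl⟩⟩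
            intro h1i; exact absurd (by exact_mod_cast h1i : (1:Int) ≤ (i:Int)) hi1
        obtain ⟨SF1, Done1, Fvis1, Ff1⟩ := H1
        -- facts about branch 2
        have H2 : pvSF grid s1.1 s1.2.1 j0 s2.1 s2.2.1 ∧
            (pvVal grid i j0 < pvVal grid i (j0+1) → pvVis s2.1 i (j0+1)) ∧
            (s2.2.2 = true → ∃ a, pvVis s2.1 a (j0+1)) ∧
            (s2.2.2 = false → s2.1 = s1.1 ∧ s2.2.1 = s1.2.1) := by
          rw [hs2]
          obtain ⟨hSF, hDone, hFvis, hFf⟩ := pvStepCell_pvSF grid s1.1 s1.2.1 i j0 i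
            SF1.shape SF1.dpVal hiM hj1
            (fun hlt => pvReach_succ_intro grid j0 i i hiM hre0 (Or.inr (Or.inl rfl)) hlt)
          exact ⟨hSF, hDone, fun hf => ⟨i, hFvis hf⟩, hFf⟩
        obtain ⟨SF2, Done2, Fvis2, Ff2⟩ := H2
        -- facts about branch 3
        have H3 : pvSF grid s2.1 s2.2.1 j0 s3.1 s3.2.1 ∧
            (∀ hii : i + 1 < pvM grid, pvVal grid i j0 < pvVal grid (i+1) (j0+1) → pvVis s3.1 (i+1) (j0+1)) ∧
            (s3.2.2 = true → ∃ a, pvVis s3.1 a (j0+1)) ∧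
            (s3.2.2 = false → s3.1 = s2.1 ∧ s3.2.1 = s2.2.1) := by
          rw [hs3]
          by_cases hi3 : (i:Int) + 1 < ((pvM grid : Nat) : Int)
          · rw [if_pos hi3]
            have hii : (i:Int) + 1 = ((i+1 : Nat) : Int) := by omega
            rw [hii]
            obtain ⟨hSF, hDone, hFvis, hFf⟩ := pvStepCell_pvSF grid s2.1 s2.2.1 i j0 (i+1)
              SF2.shape SF2.dpVal (by exact_mod_cast hi3) hj1
              (fun hlt => pvReach_succ_intro grid j0 i (i+1) (by exact_mod_cast hi3) hre0
                (Or.inr (Or.inr rfl)) hlt)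
            exact ⟨hSF, fun _ h => hDone h, fun hf => ⟨i+1, hFvis hf⟩, hFf⟩
          · rw [if_neg hi3]
            refine ⟨pvSF_id grid s2.1 s2.2.1 j0 SF2.shape SF2.dpVal, ?_, by simp, fun _ => ⟨rfl, rfl⟩⟩
            intro h1i; exact absurd (by exact_mod_cast h1i : (i:Int) + 1 < ((pvM grid : Nat):Int)) hi3
        obtain ⟨SF3, Done3, Fvis3, Ff3⟩ := H3
        have SF : pvSF grid dp rest j0 s3.1 s3.2.1 :=
          pvSF_comp grid dp s2.1 s3.1 rest s2.2.1 s3.2.1 j0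
            (pvSF_comp grid dp s1.1 s2.1 rest s1.2.1 s2.2.1 j0 SF1 SF2) SF3
        -- the popped cell is fully processed
        have hDone : ∀ r, r < pvM grid → pvAdj i r → pvVal grid i j0 < pvVal grid r (j0+1) →
            pvVis s3.1 r (j0+1) := by
          intro r hrM hadj hlt
          rcases hadj with h | h | h
          · have hr : r = i - 1 := by omega
            subst hr
            exact SF3.mono _ _ (SF2.mono _ _ (Done1 (by omega) hlt))
          · subst h
            exact SF3.mono _ _ (Done2 hlt)
          · subst h
            exact Done3 hrM hlt
        -- new visited cells are justified
        have hVisS : ∀ a b, pvVis s3.1 a b →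
            a < pvM grid ∧ b < pvN grid ∧ 1 ≤ b ∧ pvReach grid b a = true := by
          intro a b hv
          rcases SF.new a b hv with hold | ⟨hb, ha, hre, _⟩
          · exact hInv.visSound a b hold
          · subst hb; exact ⟨ha, hj1, by omega, hre⟩
        have hPend : ∀ t ∈ s3.2.1, ∃ a b : Nat,
            t = ((b:Int), (a:Int), (b:Int)) ∧ a < pvM grid ∧ b < pvN grid ∧ pvReach grid b a = true := by
          intro t ht
          rcases SF.pendSub t ht with h | ⟨a, haM, hre, hteq⟩
          · exact hInv.pend t (List.mem_cons_of_mem _ h)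
          · exact ⟨a, j0+1, hteq, haM, hj1, hre⟩
        have hClosure : ∀ a b, a < pvM grid → b < pvN grid → (b = 0 ∨ pvVis s3.1 a b) →
            (((b:Int), (a:Int), (b:Int)) ∈ s3.2.1 ∨
              ∀ r, r < pvM grid → pvAdj a r → b+1 < pvN grid →
                pvVal grid a b < pvVal grid r (b+1) → pvVis s3.1 r (b+1)) := by
          intro a b haM hbN hact
          have hOld : (b = 0 ∨ pvVis dp a b) →
              (((b:Int), (a:Int), (b:Int)) ∈ s3.2.1 ∨
                ∀ r, r < pvM grid → pvAdj a r → b+1 < pvN grid →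
                  pvVal grid a b < pvVal grid r (b+1) → pvVis s3.1 r (b+1)) := by
            intro hact'
            rcases hInv.closure a b haM hbN hact' with hmem | hcl
            · rcases List.mem_cons.1 hmem with heq | hmem'
              · have hb : b = j0 ∧ a = i := by
                  have h1' := congrArg Prod.fst heq
                  have h2' := congrArg (fun t => t.2.1) heq
                  simp at h1' h2'
                  exact ⟨h1', h2'⟩
                obtain ⟨hb1, hb2⟩ := hb
                subst hb1; subst hb2
                right
                intro r hrM hadj _ hlt
                exact hDone r hrM hadj hlt
              · left; exact SF.pendSup _ hmem'
            · right
              intro r hrM hadj hb1 hlt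
              exact SF3.mono _ _ (SF2.mono _ _ (SF1.mono _ _ (hcl r hrM hadj hb1 hlt)))
          rcases hact with hb0 | hvis
          · exact hOld (Or.inl hb0)
          · rcases SF.new a b hvis with hold | ⟨hb, ha, hre, hmem⟩
            · exact hOld (Or.inr hold)
            · subst hb
              left
              have : (((j0+1:Nat):Int), ((a:Nat):Int), ((j0+1:Nat):Int)) ∈ s3.2.1 := hmem
              exact_mod_cast this
        -- potential decreases
        have hPot : s3.2.1.length + pvU s3.1 ≤ fuel := by
          have := SF.pot
          simp only [List.length_cons] at hF
          omega
        -- case split on whether any branch fired, for the max bookkeeping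
        rcases hfire2 : (s1.2.2 || s2.2.2 || s3.2.2) with _ | _
        · -- nothing fired: state unchanged
          have hfire := hfire2
          simp only [Bool.or_eq_false_iff] at hfire
          obtain ⟨hd1, hp1⟩ := Ff1 hfire.1.1
          obtain ⟨hd2, hp2⟩ := Ff2 hfire.1.2
          obtain ⟨hd3, hp3⟩ := Ff3 hfire.2
          rw [if_neg (by simp)]
          refine ih s3.2.1 mx s3.1
            ⟨SF.shape, SF.dpVal, hVisS, hPend, hClosure, hInv.mxlow, ?_, ?_⟩ hPot
          · rcases hInv.mxwit with h | ⟨a, b, hv, he⟩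
            · exact Or.inl h
            · exact Or.inr ⟨a, b, SF.mono a b hv, he⟩
          · intro a b hv
            rw [hd3, hd2, hd1] at hv
            exact hInv.mxub a b hv
        · -- some branch fired: mx becomes max mx (j0+1)
          have hfire := hfire2
          rw [if_pos rfl]
          have hwit : ∃ a, pvVis s3.1 a (j0+1) := by
            rcases Bool.or_eq_true_iff.1 hfire with h | h
            · rcases Bool.or_eq_true_iff.1 h with h' | h'
              · obtain ⟨a, ha⟩ := Fvis1 h'
                exact ⟨a, SF3.mono _ _ (SF2.mono _ _ ha)⟩
              · obtain ⟨a, ha⟩ := Fvis2 h'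
                exact ⟨a, SF3.mono _ _ ha⟩
            · exact Fvis3 h
          obtain ⟨aw, haw⟩ := hwit
          refine ih s3.2.1 (max mx ((j0:Int)+1)) s3.1
            ⟨SF.shape, SF.dpVal, hVisS, hPend, hClosure, ?_, ?_, ?_⟩ hPot
          · have := hInv.mxlow; omega
          · by_cases hle : mx ≤ (j0:Int)+1
            · right
              exact ⟨aw, j0+1, haw, by rw [max_eq_right hle]; push_cast; ring⟩
            · rcases hInv.mxwit with h | ⟨a, b, hv, he⟩
              · exfalso; omega
              · right
                exact ⟨a, b, SF.mono a b hv, by rw [max_eq_left (by omega)]; exact he⟩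
          · intro a b hv
            rcases SF.new a b hv with hold | ⟨hb, _, _, _⟩
            · have := hInv.mxub a b hold; omega
            · subst hb; push_cast; omega

lemma pvInvA_empty_ans (grid : List (List Int)) (mx : Int) (dp : List (List Int))
    (h : pvInvA grid [] mx dp) : pvIsAns grid mx := by
  have hcomp : ∀ b, b < pvN grid → ∀ a, pvReach grid b a = true → b = 0 ∨ pvVis dp a b := by
    intro b
    induction b with
    | zero => intro _ a _; exact Or.inl rfl
    | succ b ihb =>
      intro hbN a hre
      obtain ⟨haM, i, hrei, hadj, hlt⟩ := pvReach_succ_elim grid b a hre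
      have hiM : i < pvM grid := pvReach_lt grid b i hrei
      have hact : b = 0 ∨ pvVis dp i b := ihb (by omega) i hrei
      rcases h.closure i b hiM (by omega) hact with hmem | hcl
      · simp at hmem
      · exact Or.inr (hcl a haM hadj hbN hlt)
  refine ⟨h.mxlow, ?_, ?_⟩
  · rcases h.mxwit with h0 | ⟨a, b, hv, he⟩
    · exact Or.inl h0
    · obtain ⟨haM, hbN, hb1, hre⟩ := h.visSound a b hv
      exact Or.inr ⟨b, he, hb1, hbN, a, hre⟩
  · rintro j hj1 hjN ⟨a, hre⟩
    rcases hcomp j hjN a hre with h0 | hvis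
    · omega
    · exact h.mxub a j hvis

lemma pvGetD_replicate {α : Type} (n k : Nat) (x d : α) :
    (List.replicate n x).getD k d = if k < n then x else d := by
  rw [List.getD_eq_getElem?_getD, List.getElem?_replicate]
  split <;> simp

lemma pvVal_zero (m n : Nat) (a b : Nat) :
    pvVal (List.replicate m (List.replicate n (0:Int))) a b = 0 := by
  unfold pvVal
  rw [pvGetD_replicate]
  split
  · rw [pvGetD_replicate]; split <;> rfl
  · simp

lemma pvU_init (m n : Nat) :
    pvU (List.replicate m (List.replicate n (0:Int))) = m * n := by
  unfold pvU pvRowU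
  simp [List.map_replicate, List.sum_replicate, smul_eq_mul]

lemma pvInvA_init (grid : List (List Int)) (hN : 1 ≤ pvN grid) :
    pvInvA grid ((PySem.List.pyRange 0 ((pvM grid : Nat) : Int) 1).reverse.map
        (fun i => ((0:Int), i, (0:Int)))) 0
      (List.replicate (pvM grid) (List.replicate (pvN grid) (0:Int))) := by
  refine ⟨⟨by simp, ?_⟩, fun a b => Or.inl (pvVal_zero _ _ a b), ?_, ?_, ?_, le_refl 0, Or.inl rfl, ?_⟩
  · intro row hrow
    rw [List.eq_of_mem_replicate hrow]
    simp
  · intro a b hv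
    exact absurd (pvVal_zero _ _ a b) hv
  · intro t ht
    simp only [List.mem_map, List.mem_reverse] at ht
    obtain ⟨x, hx, hteq⟩ := ht
    rw [PySem.List.mem_pyRange_one] at hx
    refine ⟨x.toNat, 0, ?_, ?_, ?_, ?_⟩
    · rw [← hteq]; simp [Prod.ext_iff]; omega
    · omega
    · omega
    · simp [pvReach]; omega
  · intro a b haM hbN hact
    rcases hact with hb0 | hvis
    · subst hb0
      left
      simp only [List.mem_map, List.mem_reverse]
      refine ⟨(a : Int), ?_, by simp⟩
      rw [PySem.List.mem_pyRange_one]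
      constructor <;> [omega; exact_mod_cast haM]
    · exact absurd (pvVal_zero _ _ a b) hvis
  · intro a b hv
    exact absurd (pvVal_zero _ _ a b) hv

lemma pvGetD_zero_headD (grid : List (List Int)) :
    PySem.List.pyGetD grid 0 ([] : List Int) = grid.headD [] := by
  rw [show ((0:Int)) = ((0:Nat):Int) from rfl, PySem.List.pyGetD_natCast]
  cases grid <;> rfl

lemma maxMoves_isAns (grid : List (List Int)) (hN : 1 ≤ pvN grid) :
    pvIsAns grid (maxMoves grid) := by
  unfold maxMoves
  simp only [pvGetD_zero_headD]
  obtain ⟨dpF, hInvF⟩ := pvLoopA_post grid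
    (grid.length * (grid.headD []).length + grid.length + 1)
    ((PySem.List.pyRange 0 ((pvM grid : Nat) : Int) 1).reverse.map (fun i => ((0:Int), i, (0:Int))))
    0 (List.replicate (pvM grid) (List.replicate (pvN grid) (0:Int)))
    (pvInvA_init grid hN)
    (by
      simp only [List.length_map, List.length_reverse, PySem.List.length_pyRange_one, pvU_init]
      have : ((pvM grid : Int) - 0).toNat = pvM grid := by omega
      rw [this]
      unfold pvM pvN
      omega)
  exact pvInvA_empty_ans grid _ dpF hInvF

lemma pvTryMove_spec (grid : List (List Int)) (jn k : Nat) (hjn : 1 ≤ jn)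
    (st : List Bool × Bool) (hlen : st.1.length = pvM grid) (r : Int) :
    (pvTryMove grid ((pvM grid : Nat):Int) ((jn:Nat):Int) ((k:Nat):Int) st r).1.length = pvM grid ∧
    (∀ a : Nat, (pvTryMove grid ((pvM grid : Nat):Int) ((jn:Nat):Int) ((k:Nat):Int) st r).1.getD a false = true ↔
      (st.1.getD a false = true ∨
        ((a:Int) = r ∧ a < pvM grid ∧ pvVal grid k (jn-1) < pvVal grid a jn))) ∧
    ((pvTryMove grid ((pvM grid : Nat):Int) ((jn:Nat):Int) ((k:Nat):Int) st r).2 = true ↔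
      (st.2 = true ∨ ∃ a : Nat, (a:Int) = r ∧ a < pvM grid ∧ pvVal grid k (jn-1) < pvVal grid a jn)) := by
  have hj : ((jn:Int) - 1) = ((jn - 1 : Nat) : Int) := by omega
  unfold pvTryMove
  rw [hj]
  by_cases hg : 0 ≤ r ∧ r < ((pvM grid : Nat):Int) ∧
      pvIdx2 grid ((k:Nat):Int) ((jn-1 : Nat):Int) < pvIdx2 grid r ((jn:Nat):Int)
  · rw [if_pos hg]
    obtain ⟨hr0, hrM, hlt⟩ := hg
    have hra : r = ((r.toNat : Nat) : Int) := by omega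
    have haM : r.toNat < pvM grid := by omega
    rw [hra] at hlt
    rw [pvIdx2_cast, pvIdx2_cast] at hlt
    have hset : PySem.List.pySetD st.1 r true = st.1.set r.toNat true := by
      rw [hra]
      unfold PySem.List.pySetD
      rw [PySem.List.pySet?_natCast _ _ _ (by omega), Option.getD_some, Int.toNat_natCast]
    refine ⟨by simp [hset, hlen], ?_, ?_⟩
    · intro a
      simp only [hset]
      rw [pvGetD_set _ _ _ _ _ (by omega)]
      by_cases har : a = r.toNat
      · subst har
        rw [if_pos rfl]
        constructor
        · intro _; exact Or.inr ⟨by omega, haM, hlt⟩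
        · intro _; rfl
      · rw [if_neg har]
        constructor
        · intro h; exact Or.inl h
        · rintro (h | ⟨hae, _, _⟩)
          · exact h
          · exfalso; omega
    · constructor
      · intro _; exact Or.inr ⟨r.toNat, by omega, haM, hlt⟩
      · intro _; rfl
  · rw [if_neg hg]
    have hno : ¬ ∃ a : Nat, (a:Int) = r ∧ a < pvM grid ∧ pvVal grid k (jn-1) < pvVal grid a jn := by
      rintro ⟨a, hae, haM, hlt⟩
      apply hg
      refine ⟨by omega, by omega, ?_⟩
      rw [← hae, pvIdx2_cast, pvIdx2_cast]
      exact hlt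
    refine ⟨hlen, ?_, ?_⟩
    · intro a
      constructor
      · intro h; exact Or.inl h
      · rintro (h | h)
        · exact h
        · exact absurd ⟨a, h⟩ hno
    · constructor
      · intro h; exact Or.inl h
      · rintro (h | h)
        · exact h
        · exact absurd h hno

lemma pvRow_spec (grid : List (List Int)) (jn k : Nat) (hjn : 1 ≤ jn)
    (st : List Bool × Bool) (hlen : st.1.length = pvM grid) :
    ([(k:Int)-1, (k:Int), (k:Int)+1].foldl (pvTryMove grid ((pvM grid : Nat):Int) ((jn:Nat):Int) ((k:Nat):Int)) st).1.length = pvM grid ∧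
    (∀ a : Nat, ([(k:Int)-1, (k:Int), (k:Int)+1].foldl (pvTryMove grid ((pvM grid : Nat):Int) ((jn:Nat):Int) ((k:Nat):Int)) st).1.getD a false = true ↔
      (st.1.getD a false = true ∨
        (pvAdj k a ∧ a < pvM grid ∧ pvVal grid k (jn-1) < pvVal grid a jn))) ∧
    (([(k:Int)-1, (k:Int), (k:Int)+1].foldl (pvTryMove grid ((pvM grid : Nat):Int) ((jn:Nat):Int) ((k:Nat):Int)) st).2 = true ↔
      (st.2 = true ∨ ∃ a : Nat, pvAdj k a ∧ a < pvM grid ∧ pvVal grid k (jn-1) < pvVal grid a jn)) := by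
  simp only [List.foldl_cons, List.foldl_nil]
  obtain ⟨L1, G1, A1⟩ := pvTryMove_spec grid jn k hjn st hlen ((k:Int)-1)
  obtain ⟨L2, G2, A2⟩ := pvTryMove_spec grid jn k hjn _ L1 ((k:Int))
  obtain ⟨L3, G3, A3⟩ := pvTryMove_spec grid jn k hjn _ L2 ((k:Int)+1)
  have hcnd : ∀ a : Nat,
      (((a:Int) = (k:Int)-1 ∨ (a:Int) = (k:Int) ∨ (a:Int) = (k:Int)+1) ∧ a < pvM grid ∧
        pvVal grid k (jn-1) < pvVal grid a jn) ↔
      (pvAdj k a ∧ a < pvM grid ∧ pvVal grid k (jn-1) < pvVal grid a jn) := by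
    intro a
    unfold pvAdj
    constructor
    · rintro ⟨hc, hm, hv⟩; exact ⟨by omega, hm, hv⟩
    · rintro ⟨hc, hm, hv⟩; exact ⟨by omega, hm, hv⟩
  refine ⟨L3, ?_, ?_⟩
  · intro a
    rw [G3 a, G2 a, G1 a]
    constructor
    · rintro (((h0 | ⟨h, hm, hv⟩) | ⟨h, hm, hv⟩) | ⟨h, hm, hv⟩)
      · exact Or.inl h0
      · exact Or.inr ((hcnd a).1 ⟨Or.inl h, hm, hv⟩)
      · exact Or.inr ((hcnd a).1 ⟨Or.inr (Or.inl h), hm, hv⟩)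
      · exact Or.inr ((hcnd a).1 ⟨Or.inr (Or.inr h), hm, hv⟩)
    · rintro (h0 | ⟨hadj, hm, hv⟩)
      · exact Or.inl (Or.inl (Or.inl h0))
      · rcases hadj with h | h | h
        · exact Or.inl (Or.inl (Or.inr ⟨by omega, hm, hv⟩))
        · exact Or.inl (Or.inr ⟨by omega, hm, hv⟩)
        · exact Or.inr ⟨by omega, hm, hv⟩
  · rw [A3, A2, A1]
    constructor
    · rintro (((h0 | ⟨a, h, hm, hv⟩) | ⟨a, h, hm, hv⟩) | ⟨a, h, hm, hv⟩)
      · exact Or.inl h0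
      · exact Or.inr ⟨a, (hcnd a).1 ⟨Or.inl h, hm, hv⟩⟩
      · exact Or.inr ⟨a, (hcnd a).1 ⟨Or.inr (Or.inl h), hm, hv⟩⟩
      · exact Or.inr ⟨a, (hcnd a).1 ⟨Or.inr (Or.inr h), hm, hv⟩⟩
    · rintro (h0 | ⟨a, hadj, hm, hv⟩)
      · exact Or.inl (Or.inl (Or.inl h0))
      · rcases hadj with h | h | h
        · exact Or.inl (Or.inl (Or.inr ⟨a, by omega, hm, hv⟩))
        · exact Or.inl (Or.inr ⟨a, by omega, hm, hv⟩)
        · exact Or.inr ⟨a, by omega, hm, hv⟩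

lemma pvColumn_spec (grid : List (List Int)) (jn : Nat) (hjn : 1 ≤ jn)
    (cur : List Bool) :
    (pvColumn grid ((pvM grid : Nat):Int) ((jn:Nat):Int) cur).1.length = pvM grid ∧
    (∀ a : Nat, (pvColumn grid ((pvM grid : Nat):Int) ((jn:Nat):Int) cur).1.getD a false = true ↔
      (a < pvM grid ∧ ∃ i, i < pvM grid ∧ cur.getD i false = true ∧ pvAdj i a ∧
        pvVal grid i (jn-1) < pvVal grid a jn)) ∧
    ((pvColumn grid ((pvM grid : Nat):Int) ((jn:Nat):Int) cur).2 = true ↔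
      ∃ a : Nat, (pvColumn grid ((pvM grid : Nat):Int) ((jn:Nat):Int) cur).1.getD a false = true) := by
  unfold pvColumn
  rw [PySem.List.pyRange_zero_natCast, List.foldl_map]
  have main : ∀ t, t ≤ pvM grid →
      ((List.range t).foldl
        (fun st k => if PySem.List.pyGetD cur ((k:Nat):Int) false then
          [((k:Nat):Int)-1, ((k:Nat):Int), ((k:Nat):Int)+1].foldl
            (pvTryMove grid ((pvM grid : Nat):Int) ((jn:Nat):Int) ((k:Nat):Int)) st else st)
        (List.replicate (((pvM grid : Nat):Int)).toNat false, false)).1.length = pvM grid ∧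
      (∀ a : Nat, ((List.range t).foldl
        (fun st k => if PySem.List.pyGetD cur ((k:Nat):Int) false then
          [((k:Nat):Int)-1, ((k:Nat):Int), ((k:Nat):Int)+1].foldl
            (pvTryMove grid ((pvM grid : Nat):Int) ((jn:Nat):Int) ((k:Nat):Int)) st else st)
        (List.replicate (((pvM grid : Nat):Int)).toNat false, false)).1.getD a false = true ↔
        (a < pvM grid ∧ ∃ i, i < t ∧ cur.getD i false = true ∧ pvAdj i a ∧
          pvVal grid i (jn-1) < pvVal grid a jn)) ∧
      (((List.range t).foldl
        (fun st k => if PySem.List.pyGetD cur ((k:Nat):Int) false then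
          [((k:Nat):Int)-1, ((k:Nat):Int), ((k:Nat):Int)+1].foldl
            (pvTryMove grid ((pvM grid : Nat):Int) ((jn:Nat):Int) ((k:Nat):Int)) st else st)
        (List.replicate (((pvM grid : Nat):Int)).toNat false, false)).2 = true ↔
        ∃ a : Nat, a < pvM grid ∧ ∃ i, i < t ∧ cur.getD i false = true ∧ pvAdj i a ∧
          pvVal grid i (jn-1) < pvVal grid a jn) := by
    intro t
    induction t with
    | zero =>
      intro _
      simp only [List.range_zero, List.foldl_nil]
      refine ⟨by simp, ?_, ?_⟩
      · intro a
        rw [pvGetD_replicate]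
        constructor
        · intro h; split at h <;> simp_all
        · rintro ⟨_, i, hi, _⟩; omega
      · constructor
        · intro h; simp at h
        · rintro ⟨a, _, i, hi, _⟩; omega
    | succ t iht =>
      intro ht
      obtain ⟨Lt, Gt, At⟩ := iht (by omega)
      rw [List.range_succ, List.foldl_append, List.foldl_cons, List.foldl_nil]
      rw [PySem.List.pyGetD_natCast]
      by_cases hcur : cur.getD t false = true
      · rw [if_pos hcur]
        obtain ⟨L', G', A'⟩ := pvRow_spec grid jn t hjn _ Lt
        refine ⟨L', ?_, ?_⟩
        · intro a
          rw [G' a, Gt a]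
          constructor
          · rintro (⟨hm, i, hi, hc, hadj, hv⟩ | ⟨hadj, hm, hv⟩)
            · exact ⟨hm, i, by omega, hc, hadj, hv⟩
            · exact ⟨hm, t, by omega, hcur, hadj, hv⟩
          · rintro ⟨hm, i, hi, hc, hadj, hv⟩
            rcases Nat.lt_or_ge i t with hit | hit
            · exact Or.inl ⟨hm, i, hit, hc, hadj, hv⟩
            · have : i = t := by omega
              subst this
              exact Or.inr ⟨hadj, hm, hv⟩
        · rw [A', At]
          constructor
          · rintro (⟨a, ha, i, hi, hc, hadj, hv⟩ | ⟨a, hadj, hm, hv⟩)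
            · exact ⟨a, ha, i, by omega, hc, hadj, hv⟩
            · exact ⟨a, hm, t, by omega, hcur, hadj, hv⟩
          · rintro ⟨a, hm, i, hi, hc, hadj, hv⟩
            rcases Nat.lt_or_ge i t with hit | hit
            · exact Or.inl ⟨a, hm, i, hit, hc, hadj, hv⟩
            · have : i = t := by omega
              subst this
              exact Or.inr ⟨a, hadj, hm, hv⟩
      · rw [if_neg hcur]
        refine ⟨Lt, ?_, ?_⟩
        · intro a
          rw [Gt a]
          constructor
          · rintro ⟨hm, i, hi, hc, hadj, hv⟩
            exact ⟨hm, i, by omega, hc, hadj, hv⟩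
          · rintro ⟨hm, i, hi, hc, hadj, hv⟩
            rcases Nat.lt_or_ge i t with hit | hit
            · exact ⟨hm, i, hit, hc, hadj, hv⟩
            · have : i = t := by omega
              subst this
              exact absurd hc hcur
        · rw [At]
          constructor
          · rintro ⟨a, hm, i, hi, hc, hadj, hv⟩
            exact ⟨a, hm, i, by omega, hc, hadj, hv⟩
          · rintro ⟨a, hm, i, hi, hc, hadj, hv⟩
            rcases Nat.lt_or_ge i t with hit | hit
            · exact ⟨a, hm, i, hit, hc, hadj, hv⟩
            · have : i = t := by omega
              subst this
              exact absurd hc hcur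
  obtain ⟨L, G, A⟩ := main (pvM grid) (le_refl _)
  refine ⟨L, G, ?_⟩
  rw [A]
  constructor
  · rintro ⟨a, hm, hrest⟩
    exact ⟨a, (G a).2 ⟨hm, hrest⟩⟩
  · rintro ⟨a, ha⟩
    obtain ⟨hm, hrest⟩ := (G a).1 ha
    exact ⟨a, hm, hrest⟩

lemma pvLoopB_post (grid : List (List Int)) :
    ∀ (k jn : Nat) (cur : List Bool), k + jn = pvN grid → 1 ≤ jn →
      (∀ a : Nat, cur.getD a false = true ↔ pvReach grid (jn-1) a = true) →
      (∃ a : Nat, cur.getD a false = true) →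
      pvIsAns grid (pvLoopB grid ((pvM grid : Nat) : Int) cur ((jn:Int)-1) ((jn:Nat):Int) k) := by
  intro k
  induction k with
  | zero =>
    intro jn cur hsum hjn hchar hne
    have hres : pvLoopB grid ((pvM grid : Nat) : Int) cur ((jn:Int)-1) ((jn:Nat):Int) 0 = (jn:Int)-1 := rfl
    rw [hres]
    refine ⟨by omega, ?_, ?_⟩
    · by_cases h1 : jn = 1
      · subst h1; left; norm_num
      · right
        obtain ⟨a, ha⟩ := hne
        exact ⟨jn-1, by omega, by omega, by omega, a, (hchar a).1 ha⟩
    · intro j hj1 hjN _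
      omega
  | succ k ihk =>
    intro jn cur hsum hjn hchar hne
    rw [pvLoopB]
    obtain ⟨hlen', hgetd, halive⟩ := pvColumn_spec grid jn hjn cur
    have hjn' : jn - 1 + 1 = jn := by omega
    have hnxt : ∀ a : Nat,
        (pvColumn grid ((pvM grid : Nat):Int) ((jn:Nat):Int) cur).1.getD a false = true ↔
        pvReach grid jn a = true := by
      intro a
      rw [hgetd a]
      constructor
      · rintro ⟨haM, i, hiM, hcuri, hadj, hlt⟩
        have h' := pvReach_succ_intro grid (jn-1) i a haM ((hchar i).1 hcuri) hadj
          (by rw [hjn']; exact hlt)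
        rwa [hjn'] at h'
      · intro hre
        rw [← hjn'] at hre
        obtain ⟨haM, i, hrei, hadj, hlt⟩ := pvReach_succ_elim grid (jn-1) a hre
        rw [hjn'] at hlt
        exact ⟨haM, i, pvReach_lt _ _ _ hrei, (hchar i).2 hrei, hadj, hlt⟩
    rcases hcol : pvColumn grid ((pvM grid : Nat):Int) ((jn:Nat):Int) cur with ⟨nxt, alive⟩
    rw [hcol] at hgetd halive hnxt
    cases alive with
    | true =>
      have hres := ihk (jn+1) nxt (by omega) (by omega) (by
          intro a
          have := hnxt a
          simpa using this)
        (by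
          obtain ⟨a, ha⟩ := halive.1 rfl
          exact ⟨a, ha⟩)
      have hc1 : ((jn+1 : Nat) : Int) - 1 = (jn:Int) := by push_cast; ring
      have hc2 : ((jn+1 : Nat) : Int) = (jn:Int) + 1 := by push_cast; ring
      rw [hc1, hc2] at hres
      exact hres
    | false =>
      show pvIsAns grid ((jn:Int) - 1)
      refine ⟨by omega, ?_, ?_⟩
      · by_cases h1 : jn = 1
        · subst h1; left; norm_num
        · right
          obtain ⟨a, ha⟩ := hne
          exact ⟨jn-1, by omega, by omega, by omega, a, (hchar a).1 ha⟩
      · intro j hj1 hjN hrej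
        by_cases hle : j ≤ jn - 1
        · omega
        · exfalso
          have hnej : ∃ a, pvReach grid jn a = true :=
            pvReach_le grid j jn (by omega) hrej
          obtain ⟨a, ha⟩ := hnej
          have := (hnxt a).2 ha
          exact absurd (halive.2 ⟨a, this⟩) (by simp)

lemma maxMoves_alt_isAns (grid : List (List Int)) (hM : 1 ≤ pvM grid)
    (hN : 1 ≤ pvN grid) : pvIsAns grid (maxMoves_alt grid) := by
  unfold maxMoves_alt
  simp only [pvGetD_zero_headD]
  have hres := pvLoopB_post grid (pvN grid - 1) 1 (List.replicate grid.length true)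
    (by omega) le_rfl
    (by
      intro a
      rw [pvGetD_replicate]
      have h0 : (1:Nat) - 1 = 0 := rfl
      rw [h0]
      constructor
      · intro h
        split at h
        · next hh =>
          simp only [pvReach, decide_eq_true_eq]
          exact hh
        · simp at h
      · intro h
        have ha : a < grid.length := by
          simpa only [pvReach, decide_eq_true_eq] using h
        rw [if_pos ha])
    (⟨0, by rw [pvGetD_replicate, if_pos (by exact hM)]⟩)
  have hc1 : ((1:Nat):Int) - 1 = (0:Int) := by norm_num
  have hc2 : ((1:Nat):Int) = (1:Int) := by norm_num
  rw [hc1, hc2] at hres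
  have hk : ((((grid.headD []).length :Nat):Int) - 1).toNat = pvN grid - 1 := by
    show ((((grid.headD []).length : Nat) : Int) - 1).toNat = (grid.headD []).length - 1
    omega
  rw [hk]
  exact hres

-- A = B on Pre_
theorem maxMoves_spec : Claim_equal_maxMoves := by
  intro grid _ hPre
  obtain ⟨hne, hN, -⟩ := hPre
  have hM : 1 ≤ pvM grid := by
    cases grid with
    | nil => exact absurd rfl hne
    | cons g gs => simp [pvM]
  unfold Spec_maxMoves
  exact pvIsAns_unique grid (maxMoves grid) (maxMoves_alt grid)
    (maxMoves_isAns grid hN) (maxMoves_alt_isAns grid hM hN)
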